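-- pv_equiv track=rewrite | github.com/rachit1994/ai-agent-generator | src/scale_out_api_mcp_plugin_platform_features/feature_13_sandbox_hardening_egress_cgroups_limits/runtime.py | _structured_deny_events
-- ===== SOURCE A (Python) =====
-- from typing import Any
--
-- def _valid_deny_event(event: Any) -> tuple[bool, str, str]:
--     if not isinstance(event, dict):
--         return False, "", ""
--     action = event.get("action")
--     reason = event.get("reason")
--     timestamp = event.get("timestamp")
--     event_id = event.get("event_id")
--     allowed_reasons = {
--         "egress_allowlist_violation",
--         "syscall_filtered",
--         "filesystem_violation",
--         "resource_limit_exceeded",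
--     }
--     if not isinstance(action, str) or not action.strip():
--         return False, "", ""
--     if not isinstance(reason, str) or reason not in allowed_reasons:
--         return False, "", ""
--     if not isinstance(timestamp, str) or "T" not in timestamp or not timestamp.endswith("Z"):
--         return False, "", ""
--     if not isinstance(event_id, str) or not event_id.strip():
--         return False, "", ""
--     return True, timestamp, event_id
--
-- def _structured_deny_events(audit_logs: dict[str, Any]) -> bool:
--     denied_events = audit_logs.get("denied_events")
--     if not isinstance(denied_events, list) or not denied_events:
--         return False
--     previous_timestamp = ""
--     seen_event_ids: set[str] = set()
--     for event in denied_events: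
--         valid_event, timestamp, event_id = _valid_deny_event(event)
--         if not valid_event:
--             return False
--         if previous_timestamp and timestamp < previous_timestamp:
--             return False
--         if event_id in seen_event_ids:
--             return False
--         seen_event_ids.add(event_id)
--         previous_timestamp = timestamp
--     return True
-- ===== SOURCE B (Python) =====
-- from typing import Any
--
-- def _valid_deny_event(event: Any) -> tuple[bool, str, str]:
--     if not isinstance(event, dict):
--         return False, "", ""
--     action = event.get("action")
--     reason = event.get("reason")
--     timestamp = event.get("timestamp")
--     event_id = event.get("event_id")
--     allowed_reasons = {
--         "egress_allowlist_violation",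
--         "syscall_filtered",
--         "filesystem_violation",
--         "resource_limit_exceeded",
--     }
--     if not isinstance(action, str) or not action.strip():
--         return False, "", ""
--     if not isinstance(reason, str) or reason not in allowed_reasons:
--         return False, "", ""
--     if not isinstance(timestamp, str) or "T" not in timestamp or not timestamp.endswith("Z"):
--         return False, "", ""
--     if not isinstance(event_id, str) or not event_id.strip():
--         return False, "", ""
--     return True, timestamp, event_id
--
-- def _structured_deny_events(audit_logs: dict[str, Any]) -> bool:
--     denied_events = audit_logs.get("denied_events")
--     if not isinstance(denied_events, list) or not denied_events:
--         return False
--     timestamps = []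
--     event_ids = []
--     for event in denied_events:
--         valid_event, timestamp, event_id = _valid_deny_event(event)
--         if not valid_event:
--             return False
--         timestamps.append(timestamp)
--         event_ids.append(event_id)
--     return timestamps == sorted(timestamps) and len(set(event_ids)) == len(event_ids)
-- ===== Notes on version B (the rewrite author's own statement) =====
-- stated objective: alternative
-- what changed: The fused incremental loop (running previous-timestamp comparison plus a growing seen-set) is replaced by a collect-then-bulk-check pass: validate all events collecting timestamps and event_ids into two lists, then decide order by timestamps == sorted(timestamps) and uniqueness by len(set(event_ids)) == len(event_ids).
import Mathlib
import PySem

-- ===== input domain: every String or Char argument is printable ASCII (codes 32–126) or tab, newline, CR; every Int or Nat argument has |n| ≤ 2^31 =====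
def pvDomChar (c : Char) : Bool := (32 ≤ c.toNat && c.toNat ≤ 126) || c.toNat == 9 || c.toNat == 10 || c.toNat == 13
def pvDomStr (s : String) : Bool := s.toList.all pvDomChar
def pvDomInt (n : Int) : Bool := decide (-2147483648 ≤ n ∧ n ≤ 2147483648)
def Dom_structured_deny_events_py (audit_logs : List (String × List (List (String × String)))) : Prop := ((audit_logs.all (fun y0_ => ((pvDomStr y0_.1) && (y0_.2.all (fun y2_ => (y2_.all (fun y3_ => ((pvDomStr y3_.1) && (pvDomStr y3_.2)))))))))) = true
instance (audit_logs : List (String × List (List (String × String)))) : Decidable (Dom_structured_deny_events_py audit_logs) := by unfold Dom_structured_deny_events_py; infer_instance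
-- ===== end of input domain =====

-- B replaces A's fused incremental pass (running previous-timestamp + seen-set) by a
-- collect-then-bulk-check: gather timestamps/event_ids, then compare with sorted and dedup (alternative decomposition).


-- ===== PORT A =====
-- shared helper: literal port of _valid_deny_event (the event is a dict str->str by the type
-- convention, so the isinstance checks reduce to key presence: get returning None ↔ get? = none)
def validDenyEvent (event : List (String × String)) : Bool × String × String :=
  let d : PySem.Dict String String := PySem.Dict.mk event
  let action := d.get? "action"
  let reason := d.get? "reason"
  let timestamp := d.get? "timestamp"
  let event_id := d.get? "event_id"
  let allowed_reasons : PySem.Set String :=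
    PySem.Set.ofList ["egress_allowlist_violation", "syscall_filtered",
                      "filesystem_violation", "resource_limit_exceeded"]
  match action with
  | none => (false, "", "")
  | some a =>
    if PySem.Str.strip a = "" then (false, "", "")
    else match reason with
      | none => (false, "", "")
      | some r =>
        if ¬ (r ∈ allowed_reasons) then (false, "", "")
        else match timestamp with
          | none => (false, "", "")
          | some t =>
            if ¬ (PySem.Str.isIn "T" t) ∨ ¬ (PySem.Str.endswith t "Z") then (false, "", "")
            else match event_id with
              | none => (false, "", "")
              | some i =>
                if PySem.Str.strip i = "" then (false, "", "")
                else (true, t, i)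

-- A's for-loop: state = previous_timestamp, seen_event_ids
def loopA : List (List (String × String)) → String → PySem.Set String → Bool
  | [], _, _ => true
  | e :: rest, prev, seen =>
    match validDenyEvent e with
    | (valid_event, timestamp, event_id) =>
      if !valid_event then false
      else if prev ≠ "" ∧ timestamp < prev then false
      else if event_id ∈ seen then false
      else loopA rest timestamp (PySem.Set.add seen event_id)

def structured_deny_events_py (audit_logs : List (String × List (List (String × String)))) : Bool :=
  match (PySem.Dict.mk audit_logs).get? "denied_events" with
  | none => false    -- audit_logs.get returned None: not a list
  | some denied_events =>
    if denied_events.isEmpty then false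
    else loopA denied_events "" PySem.Set.empty

-- ===== PORT B =====
-- B's loop: validate every event, collecting timestamps and event_ids (in order); None = early False
def collectDeny : List (List (String × String)) → Option (List String × List String)
  | [] => some ([], [])
  | e :: rest =>
    match validDenyEvent e with
    | (valid_event, timestamp, event_id) =>
      if !valid_event then none
      else match collectDeny rest with
        | none => none
        | some (tss, ids) => some (timestamp :: tss, event_id :: ids)

def structured_deny_events_py_alt (audit_logs : List (String × List (List (String × String)))) : Bool :=
  match (PySem.Dict.mk audit_logs).get? "denied_events" with
  | none => false
  | some denied_events =>
    if denied_events.isEmpty then false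
    else match collectDeny denied_events with
      | none => false
      | some (timestamps, event_ids) =>
        decide (PySem.List.sorted timestamps (fun x => x) false = timestamps) &&
        (PySem.Set.len (PySem.Set.ofList event_ids) == event_ids.length)

-- ===== PRECONDITION & SPEC =====
def Spec_structured_deny_events_py (audit_logs : List (String × List (List (String × String)))) (out : Bool) : Prop := out = structured_deny_events_py_alt audit_logs
instance (audit_logs : List (String × List (List (String × String)))) (out : Bool) : Decidable (Spec_structured_deny_events_py audit_logs out) := by unfold Spec_structured_deny_events_py; infer_instance

-- ===== CLAIM (what is proved, stated in full; the proofs are below) =====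
def Claim_equal_structured_deny_events_py : Prop := ∀ (audit_logs : List (String × List (List (String × String)))), Dom_structured_deny_events_py audit_logs → Spec_structured_deny_events_py audit_logs (structured_deny_events_py audit_logs)

-- ===== LEMMAS AND PROOFS =====

-- A's order check unfused: adjacent-non-decreasing with the previous timestamp threaded through
def chainOK : String → List String → Bool
  | _, [] => true
  | prev, t :: ts => if prev ≠ "" ∧ t < prev then false else chainOK t ts

-- A's uniqueness check unfused: each id fresh w.r.t. the growing seen set
def freshOK : PySem.Set String → List String → Bool
  | _, [] => true
  | seen, i :: is => if i ∈ seen then false else freshOK (PySem.Set.add seen i) is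

-- the fused loop is the conjunction of the three unfused checks
theorem loopA_eq_collect (des : List (List (String × String))) :
    ∀ (prev : String) (seen : PySem.Set String),
    loopA des prev seen =
      (match collectDeny des with
       | none => false
       | some (tss, ids) => chainOK prev tss && freshOK seen ids) := by
  induction des with
  | nil => intro prev seen; rfl
  | cons e rest ih =>
    intro prev seen
    simp only [loopA, collectDeny]
    rcases hv : validDenyEvent e with ⟨v, ts, eid⟩
    cases v with
    | false => simp
    | true =>
      simp only [Bool.not_true, Bool.false_eq_true, if_false]
      rw [ih ts (PySem.Set.add seen eid)]
      cases hc : collectDeny rest with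
      | none => split_ifs <;> simp
      | some p =>
        rcases p with ⟨tss, ids⟩
        simp only [chainOK, freshOK]
        split_ifs with h1 h2 <;> simp

theorem freshOK_eq_nodup (ids : List String) :
    ∀ (seen : PySem.Set String),
    freshOK seen ids = decide (ids.Nodup ∧ ∀ i ∈ ids, i ∉ seen) := by
  induction ids with
  | nil => intro seen; simp [freshOK]
  | cons i is ih =>
    intro seen
    simp only [freshOK]
    split_ifs with h
    · rw [eq_comm, decide_eq_false_iff_not]
      rintro ⟨-, hf⟩
      exact hf i List.mem_cons_self h
    · rw [ih (PySem.Set.add seen i), decide_eq_decide]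
      simp only [List.nodup_cons, List.mem_cons, PySem.Set.mem_add]
      constructor
      · rintro ⟨hn, hf⟩
        refine ⟨⟨fun hi => (hf i hi (Or.inr rfl)).elim, hn⟩, ?_⟩
        rintro j (rfl | hj)
        · exact h
        · exact fun hjs => hf j hj (Or.inl hjs)
      · rintro ⟨⟨hni, hn⟩, hf⟩
        refine ⟨hn, fun j hj hjm => ?_⟩
        rcases hjm with hjs | rfl
        · exact hf j (Or.inr hj) hjs
        · exact hni hj

-- |set(ids)| grows by at most one per element
theorem len_update_le (xs : List String) :
    ∀ (s : PySem.Set String), (PySem.Set.update s xs).length ≤ s.length + xs.length := by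
  induction xs with
  | nil => intro s; simp [PySem.Set.update]
  | cons x rest ih =>
    intro s
    rw [show PySem.Set.update s (x :: rest) = PySem.Set.update (PySem.Set.add s x) rest from rfl]
    have h2 := ih (PySem.Set.add s x)
    have h3 : (PySem.Set.add s x).length ≤ s.length + 1 := by
      rw [PySem.Set.add_eq_ite]; split_ifs <;> simp
    simp only [List.length_cons]
    omega

theorem len_update_eq_iff (xs : List String) :
    ∀ (s : PySem.Set String), s.Nodup →
    ((PySem.Set.update s xs).length = s.length + xs.length ↔ xs.Nodup ∧ ∀ x ∈ xs, x ∉ s) := by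
  induction xs with
  | nil => intro s _; simp [PySem.Set.update]
  | cons x rest ih =>
    intro s hs
    rw [show PySem.Set.update s (x :: rest) = PySem.Set.update (PySem.Set.add s x) rest from rfl]
    by_cases hx : x ∈ s
    · rw [PySem.Set.add_of_mem hx]
      constructor
      · intro h
        have := len_update_le rest s
        simp only [List.length_cons] at h
        omega
      · rintro ⟨-, hf⟩
        exact absurd hx (hf x List.mem_cons_self)
    · rw [PySem.Set.add_of_not_mem hx]
      have hnd : (s ++ [x]).Nodup := by
        rw [List.nodup_append]
        refine ⟨hs, List.nodup_singleton x, ?_⟩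
        intro a ha b hb
        have hbx : b = x := by simpa using hb
        subst hbx
        exact fun hab => hx (hab ▸ ha)
      rw [show s.length + (x :: rest).length = (s ++ [x]).length + rest.length by
            simp only [List.length_append, List.length_cons, List.length_nil]; omega]
      rw [ih (s ++ [x]) hnd]
      simp only [List.nodup_cons, List.mem_cons, List.mem_append, List.not_mem_nil,
        or_false]
      constructor
      · rintro ⟨hn, hf⟩
        refine ⟨⟨fun hxr => (hf x hxr (Or.inr rfl)).elim, hn⟩, ?_⟩
        rintro j (rfl | hj)
        · exact hx
        · exact fun hjs => hf j hj (Or.inl hjs)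
      · rintro ⟨⟨hxr, hn⟩, hf⟩
        refine ⟨hn, fun j hj hjm => ?_⟩
        rcases hjm with hjs | hjx
        · exact hf j (Or.inr hj) hjs
        · exact hxr (hjx ▸ hj)

theorem len_ofList_eq_iff (ids : List String) :
    (PySem.Set.len (PySem.Set.ofList ids) == (ids.length : Int)) = decide ids.Nodup := by
  have h := len_update_eq_iff ids [] List.nodup_nil
  rw [show PySem.Set.update ([] : PySem.Set String) ids = PySem.Set.ofList ids from rfl] at h
  simp at h
  rw [show PySem.Set.len (PySem.Set.ofList ids) = ((PySem.Set.ofList ids).length : Int) from rfl]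
  rw [show (((PySem.Set.ofList ids).length : Int) == (ids.length : Int)) =
        decide ((PySem.Set.ofList ids).length = ids.length) by
      by_cases hab : (PySem.Set.ofList ids).length = ids.length
      · rw [hab]; simp
      · have h1 : ¬(((PySem.Set.ofList ids).length : Int) = (ids.length : Int)) := by
          exact_mod_cast hab
        simp [hab, h1]]
  rw [decide_eq_decide]
  exact h.trans (by tauto)

-- a valid event's timestamp ends with "Z", hence is nonempty
theorem valid_ts_endswith (e : List (String × String)) (ts eid : String)
    (h : validDenyEvent e = (true, ts, eid)) : PySem.Str.endswith ts "Z" = true := by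
  simp only [validDenyEvent] at h
  repeat' split at h
  all_goals simp_all [PySem.Str.endswith]

theorem valid_ts_ne (e : List (String × String)) (ts eid : String)
    (h : validDenyEvent e = (true, ts, eid)) : ts ≠ "" := by
  intro hts
  have h2 := valid_ts_endswith e ts eid h
  rw [hts] at h2
  exact absurd h2 (by decide)

theorem collect_ts_ne (des : List (List (String × String))) :
    ∀ (tss ids : List String), collectDeny des = some (tss, ids) → ∀ t ∈ tss, t ≠ "" := by
  induction des with
  | nil =>
    intro tss ids h
    simp only [collectDeny, Option.some.injEq, Prod.mk.injEq] at h
    obtain ⟨h1, -⟩ := h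
    subst h1
    simp
  | cons e rest ih =>
    intro tss ids h
    simp only [collectDeny] at h
    rcases hv : validDenyEvent e with ⟨v, ts0, eid0⟩
    rw [hv] at h
    cases v with
    | false => simp at h
    | true =>
      simp only [Bool.not_true, Bool.false_eq_true, if_false] at h
      cases hc : collectDeny rest with
      | none => rw [hc] at h; simp at h
      | some p =>
        rcases p with ⟨tss', ids'⟩
        rw [hc] at h
        simp only [Option.some.injEq, Prod.mk.injEq] at h
        obtain ⟨h1, h2⟩ := h
        subst h1
        intro t ht
        rcases List.mem_cons.mp ht with rfl | ht'
        · exact valid_ts_ne e _ _ hv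
        · exact ih tss' ids' hc t ht'

theorem chainOK_pairwise (tss : List String) :
    ∀ prev : String, prev ≠ "" → (∀ t ∈ tss, t ≠ "") →
    chainOK prev tss = decide ((prev :: tss).Pairwise (· ≤ ·)) := by
  induction tss with
  | nil => intro prev _ _; simp [chainOK]
  | cons t ts ih =>
    intro prev hprev hne
    simp only [chainOK]
    split_ifs with h
    · rw [eq_comm, decide_eq_false_iff_not]
      intro hp
      have := (List.pairwise_cons.mp hp).1 t List.mem_cons_self
      exact absurd h.2 (not_lt.mpr this)
    · have hle : prev ≤ t := by
        rcases not_and_or.mp h with h1 | h1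
        · exact absurd hprev (by simpa using h1)
        · exact not_lt.mp h1
      · rw [ih t (hne t List.mem_cons_self) (fun u hu => hne u (List.mem_cons_of_mem t hu)),
            decide_eq_decide]
        constructor
        · intro hp
          refine List.pairwise_cons.mpr ⟨?_, hp⟩
          intro y hy
          rcases List.mem_cons.mp hy with rfl | hy'
          · exact hle
          · exact le_trans hle ((List.pairwise_cons.mp hp).1 y hy')
        · intro hp
          exact (List.pairwise_cons.mp hp).2

theorem sorted_id_eq_iff (tss : List String) :
    (PySem.List.sorted tss (fun x => x) false = tss) ↔ tss.Pairwise (· ≤ ·) := by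
  constructor
  · intro h
    conv_rhs => rw [← h]
    exact PySem.List.sorted_pairwise tss (fun x => x)
  · intro h
    exact PySem.List.sorted_eq_self_of_pairwise tss (fun x => x) h

theorem chainOK_sorted (tss : List String) (h : ∀ t ∈ tss, t ≠ "") :
    chainOK "" tss = decide (PySem.List.sorted tss (fun x => x) false = tss) := by
  cases tss with
  | nil => simp [chainOK, sorted_id_eq_iff]
  | cons t ts =>
    rw [show chainOK "" (t :: ts) = chainOK t ts by simp [chainOK]]
    rw [chainOK_pairwise ts t (h t List.mem_cons_self) (fun u hu => h u (List.mem_cons_of_mem t hu)), decide_eq_decide]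
    exact (sorted_id_eq_iff (t :: ts)).symm

-- ===== VERDICT (by name: the statement is the Claim_ definition above) =====
theorem structured_deny_events_py_spec : Claim_equal_structured_deny_events_py := by
  intro al _
  unfold Spec_structured_deny_events_py structured_deny_events_py structured_deny_events_py_alt
  cases hg : (PySem.Dict.mk al).get? "denied_events" with
  | none => rfl
  | some des =>
    simp only []
    split_ifs with he
    · rfl
    · rw [loopA_eq_collect]
      cases hc : collectDeny des with
      | none => rfl
      | some p =>
        rcases p with ⟨tss, ids⟩
        simp only []
        rw [chainOK_sorted tss (collect_ts_ne des tss ids hc),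
            freshOK_eq_nodup, len_ofList_eq_iff]
        congr 1
        rw [decide_eq_decide]
        simp [PySem.Set.empty]
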